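-- pv_equiv track=rewrite | github.com/aveuiller/code-kata | adventOfCode/2023/18/__main__.py | count_inside
-- ===== SOURCE A (Python) =====
-- from typing import List, Optional, Tuple, Dict, Set
--
-- def count_inside(dig_edges: Dict[int, Set[int]]) -> int:
--     total = 0
--     for _, fences in dig_edges.items():
--         start = 0
--         inside = False
--         for fence in fences:
--             if not inside:
--                 start = fence[0]
--             if inside:
--                 total += fence[1] - start + 1
--             inside = not inside
--
--         # Impair number of fences, count the last one
--         if inside:
--             total += fence[1] - fence[0] + 1
--     return total
-- ===== SOURCE B (Python) =====
-- def count_inside(dig_edges):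
--     def span_sum(fs):
--         if len(fs) >= 2:
--             return fs[1][1] - fs[0][0] + 1 + span_sum(fs[2:])
--         if fs:
--             return fs[0][1] - fs[0][0] + 1
--         return 0
--     return sum(span_sum(list(fences)) for fences in dig_edges.values())
-- ===== Notes on version B (the rewrite author's own statement) =====
-- stated objective: simpler
-- what changed: Replaces the stateful boolean-toggle loop (inside/start/leftover fence variable) with a recursive two-at-a-time pairwise decomposition of each row's fence list, summed over rows.
import Mathlib
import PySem

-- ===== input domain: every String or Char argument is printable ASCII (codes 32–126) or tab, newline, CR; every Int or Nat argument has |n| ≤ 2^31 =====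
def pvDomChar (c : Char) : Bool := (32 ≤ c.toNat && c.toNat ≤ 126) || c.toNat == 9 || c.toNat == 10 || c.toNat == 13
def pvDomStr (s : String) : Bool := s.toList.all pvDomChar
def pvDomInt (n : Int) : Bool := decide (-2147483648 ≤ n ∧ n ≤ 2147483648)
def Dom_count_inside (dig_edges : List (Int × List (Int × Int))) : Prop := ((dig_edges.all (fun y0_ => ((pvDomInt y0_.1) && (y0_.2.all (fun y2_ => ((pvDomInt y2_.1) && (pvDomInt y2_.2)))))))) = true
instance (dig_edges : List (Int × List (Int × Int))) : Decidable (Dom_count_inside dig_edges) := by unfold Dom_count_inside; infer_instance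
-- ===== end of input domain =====

-- B replaces A's stateful boolean-toggle scan with a recursive two-at-a-time pairwise
-- decomposition of each row's fence list (objective: simpler).

-- ===== PORT A =====
-- A's inner `for fence in fences` loop, carrying (total, start, inside) and the loop
-- variable `fence` (an Option: `none` = not yet bound; in Python it is only read when
-- `inside` is true, which forces it to be bound).  The trailing
-- `if inside: total += fence[1] - fence[0] + 1` runs when the loop is exhausted.
def pvLoopA (fences : List (Int × Int)) (total start : Int) (inside : Bool)
    (fence : Option (Int × Int)) : Int × Option (Int × Int) :=
  match fences with
  | [] =>
      (if inside then
         match fence with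
         | some f => total + (f.2 - f.1 + 1)
         | none => total          -- unreachable: inside = true only after an iteration bound `fence`
       else total, fence)
  | f :: rest =>
      let start := if !inside then f.1 else start
      let total := if inside then total + (f.2 - start + 1) else total
      pvLoopA rest total start (!inside) (some f)

def count_inside (dig_edges : List (Int × List (Int × Int))) : Int :=
  -- outer `for _, fences in dig_edges.items()`: `total` and the loop variable `fence`
  -- survive across rows; `start`/`inside` are re-initialised per row (0 / False).
  (dig_edges.foldl (fun st row => pvLoopA row.2 st.1 0 false st.2)
     ((0 : Int), (none : Option (Int × Int)))).1

-- ===== PORT B =====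
-- `span_sum(fs)`: recursion on the list, two fences at a time (fs[0], fs[1], fs[2:]).
def spanSum : List (Int × Int) → Int
  | a :: b :: rest => b.2 - a.1 + 1 + spanSum rest
  | [a] => a.2 - a.1 + 1
  | [] => 0

def count_inside_alt (dig_edges : List (Int × List (Int × Int))) : Int :=
  -- sum(span_sum(list(fences)) for fences in dig_edges.values())
  (dig_edges.map (fun row => spanSum row.2)).sum

-- ===== PRECONDITION & SPEC =====
def Spec_count_inside (dig_edges : List (Int × List (Int × Int))) (out : Int) : Prop := out = count_inside_alt dig_edges
instance (dig_edges : List (Int × List (Int × Int))) (out : Int) : Decidable (Spec_count_inside dig_edges out) := by unfold Spec_count_inside; infer_instance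

-- ===== CLAIM (what is proved, stated in full; the proofs are below) =====
def Claim_equal_count_inside : Prop := ∀ (dig_edges : List (Int × List (Int × Int))), Dom_count_inside dig_edges → Spec_count_inside dig_edges (count_inside dig_edges)

-- ===== LEMMAS AND PROOFS =====

-- A's row loop, entered with inside = false, adds exactly spanSum of the row,
-- whatever `start` and the carried `fence` are.
theorem fst_pvLoopA : ∀ (fs : List (Int × Int)) (total start : Int) (fence : Option (Int × Int)),
    (pvLoopA fs total start false fence).1 = total + spanSum fs
  | [], total, start, fence => by simp [pvLoopA, spanSum]
  | [a], total, start, fence => by simp [pvLoopA, spanSum]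
  | a :: b :: rest, total, start, fence => by
      have h1 : pvLoopA (a :: b :: rest) total start false fence
          = pvLoopA rest (total + (b.2 - a.1 + 1)) a.1 false (some b) := by
        simp [pvLoopA]
      rw [h1, fst_pvLoopA rest (total + (b.2 - a.1 + 1)) a.1 (some b)]
      simp [spanSum]; ring

theorem foldA_eq : ∀ (rows : List (Int × List (Int × Int))) (t : Int) (f : Option (Int × Int)),
    (rows.foldl (fun st row => pvLoopA row.2 st.1 0 false st.2) (t, f)).1
      = t + (rows.map (fun row => spanSum row.2)).sum
  | [], t, f => by simp
  | r :: rest, t, f => by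
      simp only [List.foldl_cons, List.map_cons, List.sum_cons]
      rw [show pvLoopA r.2 t 0 false f
            = ((pvLoopA r.2 t 0 false f).1, (pvLoopA r.2 t 0 false f).2) from rfl,
          foldA_eq rest _ _, fst_pvLoopA]
      ring

-- ===== VERDICT (by name: the statement is the Claim_ definition above) =====
theorem count_inside_spec : Claim_equal_count_inside := by
  intro dig_edges _
  unfold Spec_count_inside count_inside count_inside_alt
  rw [foldA_eq]
  simp
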